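-- pv_equiv track=rewrite | github.com/lewisir/Advent-of-Code-2023 | Day12/aoc_day12.py | get_damaged_springs
-- ===== SOURCE A (Python) =====
-- def get_damaged_springs(input_list):
--     """given a input containing #'s separated by .'s, return a list containing the numbers of contiguous #'s"""
--     hash_count = 0
--     output_list = []
--     for c in input_list:
--         if c == "#":
--             hash_count += 1
--         elif c == "." and hash_count > 0:
--             output_list.append(hash_count)
--             hash_count = 0
--     if hash_count > 0:
--         output_list.append(hash_count)
--     return output_list
-- ===== SOURCE B (Python) =====
-- def get_damaged_springs(input_list):
--     """given a input containing #'s separated by .'s, return a list containing the numbers of contiguous #'s"""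
--     segments = "".join(input_list).split(".")
--     return [n for n in (seg.count("#") for seg in segments) if n > 0]
-- ===== Notes on version B (the rewrite author's own statement) =====
-- stated objective: faster
-- what changed: Replaces A's per-character counter/flush state machine with splitting the string on the dot separator and taking each segment's hash-mark count, keeping the positive counts; the per-character Python loop disappears into C-level str.split/str.count.
import Mathlib
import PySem

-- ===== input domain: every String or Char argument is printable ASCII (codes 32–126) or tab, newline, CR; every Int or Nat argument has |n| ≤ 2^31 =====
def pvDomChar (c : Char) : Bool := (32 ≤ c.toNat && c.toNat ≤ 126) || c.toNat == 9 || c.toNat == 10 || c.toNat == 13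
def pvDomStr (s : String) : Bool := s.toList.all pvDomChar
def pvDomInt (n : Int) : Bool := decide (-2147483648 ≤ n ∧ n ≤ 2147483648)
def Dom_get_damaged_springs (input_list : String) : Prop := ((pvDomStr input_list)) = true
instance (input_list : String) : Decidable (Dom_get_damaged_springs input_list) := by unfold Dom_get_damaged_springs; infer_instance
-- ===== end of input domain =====

-- B replaces A's single-pass counter/flush loop by split-on-'.' then a '#'-count per segment (same return value; different decomposition).


-- ===== PORT A =====
-- literal transliteration of A: 'for c in input_list' with state (hash_count, output_list), then a final flush
def get_damaged_springs (input_list : String) : List Int :=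
  let st := input_list.toList.foldl
    (fun (st : Int × List Int) c =>
      if c = '#' then (st.1 + 1, st.2)
      else if c = '.' ∧ st.1 > 0 then ((0 : Int), st.2 ++ [st.1])
      else st)
    ((0 : Int), ([] : List Int))
  if st.1 > 0 then st.2 ++ [st.1] else st.2

-- ===== PORT B =====
-- '"".join(input_list)' on a string is the string itself; '.split(".")' is Chars.splitOn (sep nonempty, never raises);
-- 'seg.count("#")' is PySem.Str.count; the comprehension keeps the positive counts.
def get_damaged_springs_alt (input_list : String) : List Int :=
  let segments := (PySem.Chars.splitOn input_list.toList ['.']).map String.ofList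
  (segments.map (fun seg => (PySem.Str.count seg "#" : Int))).filter (fun n => decide (0 < n))

-- ===== PRECONDITION & SPEC =====
def Spec_get_damaged_springs (input_list : String) (out : List Int) : Prop := out = get_damaged_springs_alt input_list
instance (input_list : String) (out : List Int) : Decidable (Spec_get_damaged_springs input_list out) := by unfold Spec_get_damaged_springs; infer_instance

-- ===== CLAIM (what is proved, stated in full; the proofs are below) =====
def Claim_equal_get_damaged_springs : Prop := ∀ (input_list : String), Dom_get_damaged_springs input_list → Spec_get_damaged_springs input_list (get_damaged_springs input_list)

-- ===== LEMMAS AND PROOFS =====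

-- reference splitter: S pre l = the dot-separated segments of l, with pre prefixed to the first one
def pvS (pre : List Char) : List Char → List (List Char)
  | [] => [pre]
  | c :: rest => if c = '.' then pre :: pvS [] rest else pvS (pre ++ [c]) rest

lemma pvCountGo_spec (l : List Char) : ∀ (fuel acc : Nat), l.length ≤ fuel →
    PySem.Chars.count.go ['#'] fuel l acc = acc + l.count '#' := by
  induction l with
  | nil => intro fuel acc _; cases fuel <;> simp [PySem.Chars.count.go]
  | cons c rest ih =>
    intro fuel acc h
    cases fuel with
    | zero => simp at h
    | succ f =>
      simp only [List.length_cons, Nat.succ_le_succ_iff] at h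
      by_cases hc : c = '#'
      · subst hc
        have : List.isPrefixOf ['#'] ('#' :: rest) = true := by
          simp [List.isPrefixOf]
        simp [PySem.Chars.count.go, this, ih f (acc + 1) h]
        omega
      · have : List.isPrefixOf ['#'] (c :: rest) = false := by
          simp [List.isPrefixOf]; exact fun h' => hc h'.symm
        simp [PySem.Chars.count.go, this, ih f acc h, hc]

lemma pvCount_eq (l : List Char) : PySem.Chars.count l ['#'] = l.count '#' := by
  simp [PySem.Chars.count, pvCountGo_spec l l.length 0 le_rfl]

lemma pvSplitGo_spec (l : List Char) : ∀ (fuel : Nat) (cur : List Char) (acc : List (List Char)),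
    l.length < fuel →
    PySem.Chars.splitOn.go ['.'] fuel l cur acc = acc.reverse ++ pvS cur.reverse l := by
  induction l with
  | nil =>
    intro fuel cur acc h
    cases fuel with
    | zero => omega
    | succ f => simp [PySem.Chars.splitOn.go, pvS]
  | cons c rest ih =>
    intro fuel cur acc h
    cases fuel with
    | zero => omega
    | succ f =>
      simp only [List.length_cons, Nat.succ_lt_succ_iff] at h
      by_cases hc : c = '.'
      · subst hc
        have hp : List.isPrefixOf ['.'] ('.' :: rest) = true := by simp [List.isPrefixOf]
        simp [PySem.Chars.splitOn.go, hp, ih f [] (cur.reverse :: acc) h, pvS]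
      · have hp : List.isPrefixOf ['.'] (c :: rest) = false := by
          simp [List.isPrefixOf]; exact fun h' => hc h'.symm
        simp [PySem.Chars.splitOn.go, hp, ih f (c :: cur) acc h, pvS, hc]

lemma pvSplitOn_eq (l : List Char) : PySem.Chars.splitOn l ['.'] = pvS [] l := by
  have := pvSplitGo_spec l (l.length + 1) [] [] (Nat.lt_succ_self _)
  simpa [PySem.Chars.splitOn] using this

-- the A-side loop, flushed at the end, computes the positive per-segment '#' counts of pvS
lemma pvLoop_spec (l : List Char) : ∀ (pre : List Char) (out : List Int),
    (let st := l.foldl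
      (fun (st : Int × List Int) c =>
        if c = '#' then (st.1 + 1, st.2)
        else if c = '.' ∧ st.1 > 0 then ((0 : Int), st.2 ++ [st.1])
        else st)
      ((pre.count '#' : Int), out)
     if st.1 > 0 then st.2 ++ [st.1] else st.2)
    = out ++ ((pvS pre l).map (fun seg => (seg.count '#' : Int))).filter (fun n => decide (0 < n)) := by
  induction l with
  | nil =>
    intro pre out
    simp only [List.foldl_nil, pvS, List.map_cons, List.map_nil, List.filter_cons,
      List.filter_nil]
    by_cases h : (0 : Int) < pre.count '#'
    · rw [if_pos (show (pre.count '#' : Int) > 0 from h), if_pos (by simpa using h)]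
    · rw [if_neg (show ¬ ((pre.count '#' : Int) > 0) from h), if_neg (by simpa using h),
        List.append_nil]
  | cons c rest ih =>
    intro pre out
    by_cases h1 : c = '#'
    · subst h1
      have : (pre.count '#' : Int) + 1 = ((pre ++ ['#']).count '#' : Int) := by
        simp [List.count_append]
      simp only [List.foldl_cons, this, pvS]
      have := ih (pre ++ ['#']) out
      simpa using this
    · by_cases h2 : c = '.'
      · subst h2
        by_cases h3 : (0 : Int) < pre.count '#'
        · have hc : (('.' : Char) = '.' ∧ (((pre.count '#' : Int), out) : Int × List Int).1 > 0) :=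
            ⟨rfl, h3⟩
          have hrec := ih [] (out ++ [(pre.count '#' : Int)])
          simp only [List.count_nil, Nat.cast_zero] at hrec
          rw [List.foldl_cons, if_neg (by decide : ¬ ('.' : Char) = '#'), if_pos hc, hrec]
          simp [pvS, List.filter_cons]
          exact List.count_pos_iff.mp (by exact_mod_cast h3)
        · have hz : (pre.count '#' : Int) = 0 := by omega
          have hnc : ¬ (('.' : Char) = '.' ∧ (((pre.count '#' : Int), out) : Int × List Int).1 > 0) :=
            fun h => h3 h.2
          have hrec := ih [] out
          simp only [List.count_nil, Nat.cast_zero] at hrec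
          rw [List.foldl_cons, if_neg (by decide : ¬ ('.' : Char) = '#'), if_neg hnc, hz, hrec]
          simp [pvS, show pre.count '#' = 0 from by exact_mod_cast hz]
      · have hcnt : ((pre ++ [c]).count '#' : Int) = (pre.count '#' : Int) := by
          simp [List.count_append, h1]
        have hnc : ¬ (c = '.' ∧ ((pre.count '#' : Nat) : Int) > 0) := fun h => h2 h.1
        simp only [List.foldl_cons, if_neg h1, if_neg hnc]
        rw [← hcnt, ih (pre ++ [c]) out]
        simp [pvS, h2]

-- ===== VERDICT (by name: the statement is the Claim_ definition above) =====
theorem get_damaged_springs_spec : Claim_equal_get_damaged_springs := by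
  intro s _
  unfold Spec_get_damaged_springs get_damaged_springs get_damaged_springs_alt
  rw [pvSplitOn_eq]
  have := pvLoop_spec s.toList [] []
  simp only [List.count_nil, Nat.cast_zero, List.nil_append] at this
  rw [this]
  congr 1
  simp only [List.map_map]
  apply List.map_congr_left
  intro seg _
  simp [PySem.Str.count, pvCount_eq, String.toList_ofList]
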